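-- pv_equiv track=rewrite | github.com/Kandbox-kuaihe/mes-server | src/dispatch/message_admin/message_server/service.py | increment_group_code
-- ===== SOURCE A (Python) =====
-- def increment_group_code(current_code):
--     """递增 group_code，例如 A -> B, Z -> AA"""
--     if current_code == 'Z':
--         return 'AA'
--
--     # 将字符转为数字，计算下一个字符
--     next_code = list(current_code)
--     i = len(next_code) - 1
--
--     while i >= 0:
--         if next_code[i] == 'Z':
--             next_code[i] = 'A'
--             if i == 0:
--                 next_code.insert(0, 'A')  # 增加一位
--         else:
--             next_code[i] = chr(ord(next_code[i]) + 1)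
--             break
--         i -= 1
--
--     return ''.join(next_code)
-- ===== SOURCE B (Python) =====
-- def increment_group_code(current_code):
--     """Strip trailing 'Z's once, bump the last remaining char, pad with 'A's."""
--     core = current_code.rstrip('Z')
--     if not core:
--         return 'A' * (len(current_code) + 1) if current_code else ''
--     return core[:-1] + chr(ord(core[-1]) + 1) + 'A' * (len(current_code) - len(core))
-- ===== Notes on version B (the rewrite author's own statement) =====
-- stated objective: simpler
-- what changed: Replaces A's right-to-left index loop that mutates the char list element by element with a single rstrip('Z') followed by one string concatenation (bump the last remaining char, pad with 'A's).
import Mathlib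
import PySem

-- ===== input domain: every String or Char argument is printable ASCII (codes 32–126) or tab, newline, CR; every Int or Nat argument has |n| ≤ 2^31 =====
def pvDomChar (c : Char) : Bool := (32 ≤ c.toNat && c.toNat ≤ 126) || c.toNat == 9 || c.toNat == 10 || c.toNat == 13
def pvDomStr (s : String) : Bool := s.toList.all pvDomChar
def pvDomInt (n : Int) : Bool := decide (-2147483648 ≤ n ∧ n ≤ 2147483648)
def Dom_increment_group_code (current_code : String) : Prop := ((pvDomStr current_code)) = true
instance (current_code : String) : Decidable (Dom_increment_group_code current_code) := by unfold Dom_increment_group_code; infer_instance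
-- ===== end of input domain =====

-- B replaces A's right-to-left mutating while-loop by a single rstrip('Z') plus one concatenation (simpler, no index loop).

-- ===== PORT A =====
-- while-loop of A: index i runs down from len-1 as long as chars are 'Z'
def aLoop (cs : List Char) (i : Int) : List Char :=
  if _h : i < 0 then cs
  else if cs.getD i.toNat ' ' = 'Z' then
    -- next_code[i] = 'A'; if i == 0: insert 'A' at front; i -= 1
    let cs' := cs.set i.toNat 'A'
    let cs'' := if i = 0 then 'A' :: cs' else cs'
    aLoop cs'' (i - 1)
  else
    -- next_code[i] = chr(ord(next_code[i]) + 1); break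
    cs.set i.toNat (Char.ofNat ((cs.getD i.toNat ' ').toNat + 1))
termination_by (i + 1).toNat
decreasing_by omega

def increment_group_code (current_code : String) : String :=
  if current_code = "Z" then "AA"
  else
    let next_code := current_code.toList
    String.ofList (aLoop next_code ((next_code.length : Int) - 1))

-- ===== PORT B =====
-- current_code.rstrip('Z')
def rstripZ (l : List Char) : List Char := (l.reverse.dropWhile (fun c => c = 'Z')).reverse

def increment_group_code_alt (current_code : String) : String :=
  let cs := current_code.toList
  let core := rstripZ cs
  if core = [] then
    if cs = [] then "" else String.ofList (List.replicate (cs.length + 1) 'A')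
  else
    String.ofList (core.dropLast ++ [Char.ofNat ((core.getLastD ' ').toNat + 1)] ++ List.replicate (cs.length - core.length) 'A')

-- ===== PRECONDITION & SPEC =====
def Spec_increment_group_code (current_code : String) (out : String) : Prop := out = increment_group_code_alt current_code
instance (current_code : String) (out : String) : Decidable (Spec_increment_group_code current_code out) := by unfold Spec_increment_group_code; infer_instance

-- ===== CLAIM (what is proved, stated in full; the proofs are below) =====
def Claim_equal_increment_group_code : Prop := ∀ (current_code : String), Dom_increment_group_code current_code → Spec_increment_group_code current_code (increment_group_code current_code)

-- ===== LEMMAS AND PROOFS =====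

theorem getD_append_len (q : List Char) (c : Char) (r : List Char) (d : Char) :
    (q ++ c :: r).getD q.length d = c := by
  induction q with
  | nil => rfl
  | cons a t ih => simpa using ih

theorem set_append_len (q : List Char) (c c' : Char) (r : List Char) :
    (q ++ c :: r).set q.length c' = q ++ c' :: r := by
  induction q with
  | nil => rfl
  | cons a t ih => simpa using ih

theorem rstripZ_append_Z (q : List Char) : rstripZ (q ++ ['Z']) = rstripZ q := by
  simp [rstripZ, List.dropWhile]

theorem rstripZ_append_ne (q : List Char) (c : Char) (h : ¬ c = 'Z') :
    rstripZ (q ++ [c]) = q ++ [c] := by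
  simp [rstripZ, List.dropWhile, h]

theorem rstripZ_length_le (q : List Char) : (rstripZ q).length ≤ q.length := by
  simpa [rstripZ] using (List.dropWhile_sublist (l := q.reverse) (p := fun c => decide (c = 'Z'))).length_le

theorem loop_eq (p : List Char) (hp : p ≠ []) (k : Nat) :
    aLoop (p ++ List.replicate k 'A') ((p.length : Int) - 1) =
      if rstripZ p = [] then List.replicate (p.length + k + 1) 'A'
      else (rstripZ p).dropLast ++ Char.ofNat (((rstripZ p).getLastD ' ').toNat + 1)
             :: List.replicate (p.length - (rstripZ p).length + k) 'A' := by
  induction p using List.reverseRecOn generalizing k with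
  | nil => exact absurd rfl hp
  | append_singleton q c ih =>
    have hidx : (((q ++ [c]).length : Int) - 1) = (q.length : Int) := by simp
    rw [hidx]
    have hlist : (q ++ [c]) ++ List.replicate k 'A' = q ++ c :: List.replicate k 'A' := by simp
    rw [hlist]
    rw [aLoop]
    have hnn : ¬ ((q.length : Int) < 0) := by omega
    have htn : (q.length : Int).toNat = q.length := by omega
    simp only [hnn, dite_false, if_neg hnn, htn, getD_append_len]
    by_cases hc : c = 'Z'
    · subst hc
      simp only [if_pos rfl, set_append_len]
      by_cases hq : q = []
      · subst hq
        have : ((([] : List Char).length : Int) = 0) := by simp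
        simp only [this, if_pos rfl]
        rw [aLoop]
        simp only [rstripZ, List.reverse_nil, List.dropWhile_nil, if_pos rfl,
          List.length_append, List.length_nil, List.length_cons]
        rw [show 0 + 1 + k + 1 = k + 1 + 1 from by omega, List.replicate_succ,
          List.replicate_succ]
        simp
      · have hql : ¬ ((q.length : Int) = 0) := by
          simp [List.length_eq_zero_iff, hq]
        simp only [if_neg hql]
        have hrep : q ++ 'A' :: List.replicate k 'A' = q ++ List.replicate (k + 1) 'A' := by
          simp [List.replicate_succ]
        rw [hrep, ih hq (k + 1)]
        rw [rstripZ_append_Z]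
        have hle := rstripZ_length_le q
        by_cases hz : rstripZ q = []
        · simp only [if_pos hz]
          have hlen : q.length + (k + 1) + 1 = (q ++ ['Z']).length + k + 1 := by
            simp only [List.length_append, List.length_cons, List.length_nil]; omega
          rw [hlen]
          simp
        · simp only [if_neg hz]
          have hlen : q.length - (rstripZ q).length + (k + 1)
              = (q ++ ['Z']).length - (rstripZ q).length + k := by
            simp only [List.length_append, List.length_cons, List.length_nil]; omega
          rw [hlen]
          simp
    · simp only [if_neg hc, set_append_len, rstripZ_append_ne q c hc]
      have hne : ¬ (q ++ [c] = []) := by simp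
      simp only [if_neg hne]
      simp

-- ===== VERDICT (by name: the statement is the Claim_ definition above) =====
theorem increment_group_code_spec : Claim_equal_increment_group_code := by
  intro s _
  unfold Spec_increment_group_code increment_group_code increment_group_code_alt
  by_cases hz : s = "Z"
  · subst hz; decide
  · simp only [if_neg hz]
    by_cases he : s.toList = []
    · have hs : s = "" := String.toList_inj.mp (by simpa using he)
      subst hs
      rw [aLoop]
      simp [rstripZ]
    · have hle := loop_eq s.toList he 0
      simp only [List.replicate_zero, List.append_nil] at hle
      rw [hle]
      by_cases hr : rstripZ s.toList = []
      · have hne : ¬ s = "" := fun h => he (by rw [h]; decide)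
        simp [hr, hne]
      · simp [hr]
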